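-- pv_equiv track=rewrite | github.com/shiyanlou-015555/NLP | 1/lesson1/pattern_match.py | pat_match
-- ===== SOURCE A (Python) =====
-- def is_variable(pat):
--     return pat.startswith('?') and all(s.isalpha for s in pat[1:])
--
-- def pat_match(pattern,saying):
--     if not pattern or not saying: return []
--     if is_variable(pattern[0]):
--         return [(pattern[0],saying[0])]+pat_match(pattern[1:],saying[1:])
--     else:
--         if pattern[0] != saying[0]: return []
--         else:
--             return pat_match(pattern[1:],saying[1:])
-- ===== SOURCE B (Python) =====
-- def pat_match(pattern, saying):
--     # Single pass with an index pointer: no list slicing, O(n) total.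
--     # Note: A's is_variable reduces to startswith('?') because its
--     # `all(s.isalpha for s in ...)` tests method objects, which are truthy.
--     res = []
--     n = min(len(pattern), len(saying))
--     i = 0
--     while i < n:
--         p = pattern[i]
--         s = saying[i]
--         if p.startswith('?'):
--             res.append((p, s))
--         elif p != s:
--             break
--         i += 1
--     return res
-- ===== Notes on version B (the rewrite author's own statement) =====
-- stated objective: faster
-- what changed: Replaces recursion over list slices (each step copies both lists) with a single index-pointer loop that appends bindings to one accumulator and breaks on the first mismatch.
import Mathlib
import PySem

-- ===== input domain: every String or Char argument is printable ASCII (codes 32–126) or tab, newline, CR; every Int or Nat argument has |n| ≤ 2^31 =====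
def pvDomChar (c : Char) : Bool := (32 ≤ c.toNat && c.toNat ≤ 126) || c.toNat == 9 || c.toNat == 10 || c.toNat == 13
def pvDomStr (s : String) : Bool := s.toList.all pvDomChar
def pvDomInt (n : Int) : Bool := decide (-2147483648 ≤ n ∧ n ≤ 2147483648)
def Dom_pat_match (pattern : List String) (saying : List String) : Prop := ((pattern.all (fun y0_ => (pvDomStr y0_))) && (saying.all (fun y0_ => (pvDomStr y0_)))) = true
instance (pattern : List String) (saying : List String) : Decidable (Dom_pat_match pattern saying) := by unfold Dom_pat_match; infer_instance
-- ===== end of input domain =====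

-- B replaces A's recursion over list slices with one index-pointer loop and an
-- accumulator (asymptotically faster: no per-step list copies).


-- ===== PORT A =====
-- A's `all(s.isalpha for s in pat[1:])` tests bound-method objects, which are
-- always truthy in Python; the exact port tests `true` for every character.
def is_variable (pat : String) : Bool :=
  PySem.Str.startswith pat "?" && (pat.toList.drop 1).all (fun _ => true)

def pat_match (pattern : List String) (saying : List String) : List (String × String) :=
  match pattern, saying with
  | [], _ => []
  | _, [] => []
  | p :: ps, s :: ss =>
    if is_variable p then (p, s) :: pat_match ps ss
    else if p ≠ s then []
    else pat_match ps ss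

-- ===== PORT B =====
-- the while-loop of Source B: index i runs to n = min of lengths, breaks on mismatch
def pmLoop (pattern saying : List String) (n i : Nat) (res : List (String × String)) :
    List (String × String) :=
  if _h : i < n then
    let p := pattern.getD i ""
    let s := saying.getD i ""
    if PySem.Str.startswith p "?" then pmLoop pattern saying n (i + 1) (res ++ [(p, s)])
    else if p ≠ s then res
    else pmLoop pattern saying n (i + 1) res
  else res
termination_by n - i

def pat_match_alt (pattern : List String) (saying : List String) : List (String × String) :=
  pmLoop pattern saying (min pattern.length saying.length) 0 []

-- ===== PRECONDITION & SPEC =====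
def Spec_pat_match (pattern : List String) (saying : List String) (out : List (String × String)) : Prop := out = pat_match_alt pattern saying
instance (pattern : List String) (saying : List String) (out : List (String × String)) : Decidable (Spec_pat_match pattern saying out) := by unfold Spec_pat_match; infer_instance

-- ===== CLAIM (what is proved, stated in full; the proofs are below) =====
def Claim_equal_pat_match : Prop := ∀ (pattern : List String) (saying : List String), Dom_pat_match pattern saying → Spec_pat_match pattern saying (pat_match pattern saying)

-- ===== LEMMAS AND PROOFS =====
theorem is_variable_eq (p : String) : is_variable p = PySem.Str.startswith p "?" := by
  simp [is_variable]

theorem pat_match_past (pattern saying : List String) (i : Nat)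
    (h : min pattern.length saying.length ≤ i) :
    pat_match (pattern.drop i) (saying.drop i) = [] := by
  rcases min_le_iff.mp h with h' | h'
  · rw [List.drop_eq_nil_of_le h']
    simp [pat_match]
  · rw [List.drop_eq_nil_of_le h']
    cases pattern.drop i <;> simp [pat_match]

theorem pmLoop_eq_aux (pattern saying : List String) :
    ∀ k i res, min pattern.length saying.length - i ≤ k →
      pmLoop pattern saying (min pattern.length saying.length) i res
        = res ++ pat_match (pattern.drop i) (saying.drop i) := by
  intro k
  induction k with
  | zero =>
    intro i res h
    have hi : ¬ i < min pattern.length saying.length := by omega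
    rw [pmLoop, pat_match_past pattern saying i (by omega)]
    simp [hi]
  | succ k ih =>
    intro i res h
    rw [pmLoop]
    by_cases hi : i < min pattern.length saying.length
    · have hp : i < pattern.length := lt_of_lt_of_le hi (min_le_left _ _)
      have hs : i < saying.length := lt_of_lt_of_le hi (min_le_right _ _)
      have hk : min pattern.length saying.length - (i + 1) ≤ k := by omega
      simp only [hi, dif_pos, List.getD_eq_getElem _ _ hp, List.getD_eq_getElem _ _ hs]
      rw [List.drop_eq_getElem_cons hp, List.drop_eq_getElem_cons hs]
      by_cases hv : PySem.Str.startswith pattern[i] "?" = true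
      · simp only [hv, if_pos, pat_match, is_variable_eq, ih _ _ hk]
        simp
      · have hv' : PySem.Chars.startswith pattern[i].toList ['?'] = false := by
          revert hv; simp
        by_cases hne : pattern[i] = saying[i]
        · have hv2 : PySem.Chars.startswith saying[i].toList ['?'] = false := hne ▸ hv'
          simp [pat_match, is_variable_eq, hv2, hne, ih _ _ hk]
        · simp [pat_match, is_variable_eq, hv', hne]
    · rw [pat_match_past pattern saying i (by omega)]
      simp [hi]

theorem pmLoop_eq (pattern saying : List String) (i : Nat) (res : List (String × String)) :
    pmLoop pattern saying (min pattern.length saying.length) i res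
      = res ++ pat_match (pattern.drop i) (saying.drop i) :=
  pmLoop_eq_aux pattern saying _ i res le_rfl

-- ===== VERDICT (by name: the statement is the Claim_ definition above) =====
theorem pat_match_spec : Claim_equal_pat_match := by
  intro pattern saying _
  unfold Spec_pat_match pat_match_alt
  simpa using (pmLoop_eq pattern saying 0 []).symm
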